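-- pv_equiv track=rewrite | github.com/dlimla/Hash-Tables | src/classWork.py | myHash3
-- ===== SOURCE A (Python) =====
-- def myHash3(key,scrambleNumber):
--     stringIndex = 0
--     scrambleNumber = 17
--     for char in key:
--         if char == 'a':
--             stringIndex += 1
--             stringIndex *= scrambleNumber
--
--         if char == 'b':
--             stringIndex += 2
--             stringIndex *= scrambleNumber
--
--     return stringIndex
-- ===== SOURCE B (Python) =====
-- def myHash3(key, scrambleNumber):
--     scrambleNumber = 17
--     vs = [1 if c == 'a' else 2 for c in key if c in 'ab']
--     n = len(vs)
--     return sum(v * scrambleNumber ** (n - i) for i, v in enumerate(vs))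
-- ===== Notes on version B (the rewrite author's own statement) =====
-- stated objective: alternative
-- what changed: A accumulates Horner-style ((s+v)*17 per 'a'/'b' char); B first extracts the weight list (a->1, b->2) and returns the closed-form weighted power sum sum(v*17**(n-i)).
import Mathlib
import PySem

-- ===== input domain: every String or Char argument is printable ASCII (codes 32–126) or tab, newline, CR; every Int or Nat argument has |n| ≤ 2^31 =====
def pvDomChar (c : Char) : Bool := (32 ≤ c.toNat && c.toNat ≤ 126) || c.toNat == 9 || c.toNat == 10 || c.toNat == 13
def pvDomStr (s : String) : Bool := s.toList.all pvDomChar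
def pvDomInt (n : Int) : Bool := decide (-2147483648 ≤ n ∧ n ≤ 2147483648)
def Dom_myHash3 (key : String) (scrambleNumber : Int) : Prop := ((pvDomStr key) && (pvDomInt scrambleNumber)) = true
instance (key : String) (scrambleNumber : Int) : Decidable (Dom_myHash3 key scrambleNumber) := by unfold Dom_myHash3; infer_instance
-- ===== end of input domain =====

-- B replaces A's incremental Horner fold by extracting the 'a'/'b' weight list first and
-- evaluating the hash as a closed-form weighted power sum (alternative decomposition, same cost).


-- ===== PORT A =====
-- A's loop: stringIndex starts at 0, scrambleNumber is overwritten to 17 (the parameter is unused),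
-- and for each char, the 'a' branch then the 'b' branch update stringIndex in order.
def myHash3 (key : String) (scrambleNumber : Int) : Int :=
  key.toList.foldl
    (fun stringIndex char =>
      let stringIndex := if char = 'a' then (stringIndex + 1) * 17 else stringIndex
      if char = 'b' then (stringIndex + 2) * 17 else stringIndex)
    0

-- ===== PORT B =====
-- Source B: weight list via comprehension (filter 'a'/'b', map to 1/2), then sum of
-- v * 17^(n-i) over enumerate(vs).  n - i is always ≥ 0 here, so .toNat is exact.
def myHash3_alt (key : String) (scrambleNumber : Int) : Int :=
  let vs : List Int := key.toList.filterMap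
    (fun c => if c = 'a' then some 1 else if c = 'b' then some 2 else none)
  let n : Int := vs.length
  (PySem.List.enumerate vs).foldl (fun acc iv => acc + iv.2 * (17 : Int) ^ (n - iv.1).toNat) 0

-- ===== PRECONDITION & SPEC =====
def Spec_myHash3 (key : String) (scrambleNumber : Int) (out : Int) : Prop := out = myHash3_alt key scrambleNumber
instance (key : String) (scrambleNumber : Int) (out : Int) : Decidable (Spec_myHash3 key scrambleNumber out) := by unfold Spec_myHash3; infer_instance

-- ===== CLAIM (what is proved, stated in full; the proofs are below) =====
def Claim_equal_myHash3 : Prop := ∀ (key : String) (scrambleNumber : Int), Dom_myHash3 key scrambleNumber → Spec_myHash3 key scrambleNumber (myHash3 key scrambleNumber)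

-- ===== LEMMAS AND PROOFS =====

-- the common reference value: polynomial Σ v_i * 17^(len - i) as a structural recursion
def pvS : List Int → Int
  | [] => 0
  | v :: vs => v * 17 ^ (vs.length + 1) + pvS vs

theorem pvA_fold (cs : List Char) : ∀ (acc : Int),
    cs.foldl
      (fun stringIndex char =>
        let stringIndex := if char = 'a' then (stringIndex + 1) * 17 else stringIndex
        if char = 'b' then (stringIndex + 2) * 17 else stringIndex)
      acc
    = acc * 17 ^ (cs.filterMap (fun c => if c = 'a' then some (1 : Int) else if c = 'b' then some 2 else none)).length
      + pvS (cs.filterMap (fun c => if c = 'a' then some (1 : Int) else if c = 'b' then some 2 else none)) := by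
  induction cs with
  | nil => intro acc; simp [pvS]
  | cons c cs ih =>
    intro acc
    by_cases ha : c = 'a'
    · have hb : ¬ c = 'b' := by subst ha; decide
      simp only [List.foldl_cons, List.filterMap_cons, ha, hb, reduceIte, if_neg hb]
      rw [ih]
      simp [pvS, pow_succ]
      ring
    · by_cases hb : c = 'b'
      · simp only [List.foldl_cons, List.filterMap_cons, if_neg ha, hb, reduceIte]
        rw [ih]
        simp [pvS, pow_succ]
        ring
      · simp only [List.foldl_cons, List.filterMap_cons, if_neg ha, if_neg hb]
        rw [ih]

theorem pvB_fold (N : Nat) : ∀ (vs : List Int) (s : Nat) (acc : Int), s + vs.length = N →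
    (PySem.List.enumerate vs (s : Int)).foldl
      (fun acc iv => acc + iv.2 * (17 : Int) ^ (((N : Int) - iv.1).toNat)) acc
    = acc + pvS vs := by
  intro vs
  induction vs with
  | nil => intro s acc _; simp [PySem.List.enumerate_nil, pvS]
  | cons v vs ih =>
    intro s acc h
    have h' : s + 1 + vs.length = N := by simp [List.length_cons] at h; omega
    rw [PySem.List.enumerate_cons, List.foldl_cons]
    have hs : ((s : Int) + 1) = ((s + 1 : Nat) : Int) := by push_cast; ring
    rw [hs, ih (s + 1) _ h']
    have he : ((N : Int) - s).toNat = vs.length + 1 := by omega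
    simp [pvS, he]
    ring

theorem myHash3_eq_alt (key : String) (scrambleNumber : Int) :
    myHash3 key scrambleNumber = myHash3_alt key scrambleNumber := by
  unfold myHash3 myHash3_alt
  dsimp only
  rw [pvA_fold]
  rw [show (0 : Int) = ((0 : Nat) : Int) from rfl,
    pvB_fold (key.toList.filterMap (fun c => if c = 'a' then some (1 : Int) else if c = 'b' then some 2 else none)).length _ 0 ((0 : Nat) : Int) (by simp)]
  simp

-- ===== VERDICT (by name: the statement is the Claim_ definition above) =====
theorem myHash3_spec : Claim_equal_myHash3 := by
  intro key n _
  exact myHash3_eq_alt key n
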